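/- GENERATED by tools/from_farm_form.py from prooffarm-gif/accepted/DGifDecompressLine.15/Proof.lean (a worked proof of the farm's unit `DGifDecompressLine.15`,
   accepted by the verdict) — do not edit. -/
import Gif.Spec.Units.DGifDecompressLine_15
import Gif.Spec.AllSegs
import Gif.Spec.Proved.DGifDecompressLine_15_Lemmas

open X86 X86.User Asan ProgX.Base ProgX.Base.Spec Gif.Spec

/-!
  `DGifDecompressLine.15` (0x107045 … 0x107071 and 0x106f75 … 0x106f7d, 13 instructions; dgif_lib.c:990-992 and l.995): the arm
  `Suffix[RunningCode − 2] = DGifGetPrefixChar(Prefix, CrntCode, ClearCode)` of the LZW decoder, then `LastCode = CrntCode`, back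
  to the head of the main loop. The return address of the call (0x107051, `ret37`) is not a cut of the design: the unit makes it
  one of its own, with the entry assertion `UpdRC` stated again there (Lemmas.lean: two walks), chained here.
-/

namespace Gif.Spec.DGifDecompressLine_15

end Gif.Spec.DGifDecompressLine_15

/-- Segment 15 of `DGifDecompressLine` takes `UpdRC` at 0x107045 to `Head` at 0x106f7d with a smaller measure. -/
theorem Gif.Spec.Proved.DGifDecompressLine_15_ok : Gif.Spec.DGifDecompressLine_15.Statement := by
  intro Lay hLay μ hμ u₀ hcode h_DGifGetPrefixChar h_asan_store1_noabort H rest frames F R n m e ret v hat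
  -- the callee's contract for the frame list of the body (the own protected frame in front) and the private object
  have hgpc := h_DGifGetPrefixChar H rest (DGifDecompressLine.framesIn frames e) F.pv
  -- 0x107045 … the call of DGifGetPrefixChar (l.991) … 0x107051
  refine (Gif.Spec.DGifDecompressLine_15.dl15_seg_call Lay hLay μ hμ u₀ hcode H rest frames F R n m e ret hgpc v hat).trans ?_
  -- 0x107051 … the checked store of l.990 … `LastCode = CrntCode` (l.995) … 0x106f7d
  intro v1 hv1
  exact Gif.Spec.DGifDecompressLine_15.dl15_seg_tail Lay hLay μ hμ u₀ hcode H rest frames F R n m e ret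
    h_asan_store1_noabort v1 hv1
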